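-- pv_equiv track=rewrite | github.com/stepstreet/isbn_space_walk | tiles.py | recursive_tile_index
-- ===== SOURCE A (Python) =====
-- def recursive_tile_index(s):
--     s = str(s)
--     length = len(s)
--     digits = [int(c) for c in s[1:]]
--     index = 0
--
--     if length == 0:
--         return 0
--     elif length == 1:
--         return int(s[0])
--     elif length == 2:
--         return int(s[1])
--     elif length == 3:
--         c, d = digits
--         if c >= 2:
--             index += 8 + (c - 2) * 1
--         else:
--             index += c * 2
--         if d >= 2:
--             index += 4 + (d - 2) * 1
--         else:
--             index += d
--         if c == 3:
--             index += 1  # ?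
--     elif length == 4:
--         b, c, d = digits
--         if b >= 2:
--             index += 32 + (b - 2) * 4  # base = 32
--         else:
--             index += b * 4
--         if c >= 2:
--             index += 16 + (c - 2) * 2
--         else:
--             index += c * 2
--         if d >= 2:
--             index += 8 + (d - 2) * 1
--         else:
--             index += d
--     elif length == 5:
--         b, c, d, e = digits
--         if b >= 2:
--             index += 128 + (b - 2) * 8  # base = 128
--         else:
--             index += b * 8
--         if c >= 2:
--             index += 64 + (c - 2) * 4
--         else:
--             index += c * 4
--         if d >= 2:
--             index += 32 + (d - 2) * 2
--         else:
--             index += d * 2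
--         if e >= 2:
--             index += 16 + (e - 2) * 1
--         else:
--             index += e
--     else:
--         return 0
--
--     return index
-- ===== SOURCE B (Python) =====
-- def recursive_tile_index(s):
--     s = str(s)
--     n = len(s)
--     if n == 0 or n > 5:
--         return 0
--     if n <= 2:
--         return int(s[-1])
--     digits = [int(c) for c in s[1:]]
--     if n == 3:
--         # length 3 has irregular weights (and the c==3 anomaly): pure lookup
--         ROW = [0, 2, 8, 10, 10, 11, 12, 13, 14, 15]
--         COL = [0, 1, 4, 5, 6, 7, 8, 9, 10, 11]
--         return ROW[digits[0]] + COL[digits[1]]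
--     # lengths 4/5: the index is a base-2 positional value of remapped digits
--     # (A's bases are 2^(n-1) * weight), evaluated by Horner's scheme
--     k = (1 << (n - 1)) - 2
--     acc = 0
--     for d in digits:
--         acc = acc * 2 + (d + k if d >= 2 else d)
--     return acc
-- ===== Notes on version B (the rewrite author's own statement) =====
-- stated objective: alternative
-- what changed: Replaces A's five-way ladder of unrolled per-digit if/else weighted sums by a Horner-scheme positional evaluation: for lengths 4/5 the index is the base-2 value of digits remapped by a single offset k=2^(n-1)-2 (A's bases are exactly 2^(n-1) times the weight), folded left in one pass, and the irregular length-3 case is two precomputed 10-entry lookup lists.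
-- crash fix: On strings longer than 5 with a non-digit character after the first, A raises ValueError (it parses all trailing characters before its length dispatch) while B returns 0, the value A's own else-branch intends for over-long strings. — e.g. on recursive_tile_index("abcdef"): A raises ValueError, B returns 0
import Mathlib
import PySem

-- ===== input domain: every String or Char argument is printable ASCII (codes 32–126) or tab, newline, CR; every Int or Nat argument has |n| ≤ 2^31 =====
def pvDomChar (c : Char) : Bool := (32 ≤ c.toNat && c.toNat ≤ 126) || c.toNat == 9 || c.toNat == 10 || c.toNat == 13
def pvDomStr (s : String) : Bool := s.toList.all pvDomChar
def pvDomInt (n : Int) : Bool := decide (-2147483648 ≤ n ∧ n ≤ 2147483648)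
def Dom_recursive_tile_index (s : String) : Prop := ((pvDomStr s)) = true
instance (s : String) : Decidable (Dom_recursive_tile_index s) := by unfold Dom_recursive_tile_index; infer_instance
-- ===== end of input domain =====

-- B replaces A's per-length if/else weighted-sum ladder by a Horner-scheme base-2 positional
-- fold over offset-remapped digits (lengths 4/5) plus lookup tables for length 3 (objective: alternative).


-- ===== PORT A =====
def recursive_tile_index (s : String) : Int :=
  let cs := s.toList
  let length := cs.length
  -- digits = [int(c) for c in s[1:]]; none = ValueError, excluded by Pre_
  match (cs.drop 1).mapM (fun c => PySem.Int.ofChars? [c]) with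
  | none => 0
  | some digits =>
    if length = 0 then 0
    else if length = 1 then (PySem.Int.ofChars? (cs.take 1)).getD 0  -- int(s[0]); ValueError excluded by Pre_
    else if length = 2 then
      match digits with
      | [d] => d
      | _ => 0
    else if length = 3 then
      match digits with
      | [c, d] =>
          (if c ≥ 2 then 8 + (c - 2) * 1 else c * 2)
        + (if d ≥ 2 then 4 + (d - 2) * 1 else d)
        + (if c = 3 then 1 else 0)
      | _ => 0
    else if length = 4 then
      match digits with
      | [b, c, d] =>
          (if b ≥ 2 then 32 + (b - 2) * 4 else b * 4)
        + (if c ≥ 2 then 16 + (c - 2) * 2 else c * 2)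
        + (if d ≥ 2 then 8 + (d - 2) * 1 else d)
      | _ => 0
    else if length = 5 then
      match digits with
      | [b, c, d, e] =>
          (if b ≥ 2 then 128 + (b - 2) * 8 else b * 8)
        + (if c ≥ 2 then 64 + (c - 2) * 4 else c * 4)
        + (if d ≥ 2 then 32 + (d - 2) * 2 else d * 2)
        + (if e ≥ 2 then 16 + (e - 2) * 1 else e)
      | _ => 0
    else 0

-- ===== PORT B =====
def pvRow3 : List Int := [0, 2, 8, 10, 10, 11, 12, 13, 14, 15]
def pvCol3 : List Int := [0, 1, 4, 5, 6, 7, 8, 9, 10, 11]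

def recursive_tile_index_alt (s : String) : Int :=
  let cs := s.toList
  let n := cs.length
  if n = 0 || n > 5 then 0
  else if n ≤ 2 then
    -- int(s[-1]); ValueError excluded by Pre_
    ((PySem.List.pyGet? cs (-1)).bind (fun c => PySem.Int.ofChars? [c])).getD 0
  else
    let digits := (cs.drop 1).map (fun c => (PySem.Int.ofChars? [c]).getD 0)
    if n = 3 then
      -- ROW[digits[0]] + COL[digits[1]] (indices are digits 0..9, always in range)
      (PySem.List.pyGet? pvRow3 (digits.headD 0)).getD 0
        + (PySem.List.pyGet? pvCol3 (digits.getD 1 0)).getD 0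
    else
      -- Horner fold: 1 << (n-1) ported as 2^(n-1)
      let k : Int := 2 ^ (n - 1) - 2
      digits.foldl (fun acc d => acc * 2 + (if d ≥ 2 then d + k else d)) 0

-- ===== PRECONDITION & SPEC =====
-- Pre_ excludes exactly the inputs where A raises ValueError: a non-digit s[0] when len(s) == 1,
-- or a non-digit character after the first (int() is applied to every char of s[1:]).
def Pre_recursive_tile_index (s : String) : Prop :=
  (s.toList.length = 1 → s.toList.all Char.isDigit) ∧ (s.toList.drop 1).all Char.isDigit
instance (s : String) : Decidable (Pre_recursive_tile_index s) := by
  unfold Pre_recursive_tile_index; infer_instance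

def pvWitness_recursive_tile_index : String := "133"

-- On strings longer than 5 with a non-digit character after the first, A raises ValueError
-- (it parses all of s[1:] before its length dispatch) while B returns 0, the value A's own
-- else-branch intends for over-long strings.
def Raises_recursive_tile_index (s : String) : Prop :=
  5 < s.toList.length ∧ (s.toList.drop 1).any (fun c => !c.isDigit)
instance (s : String) : Decidable (Raises_recursive_tile_index s) := by
  unfold Raises_recursive_tile_index; infer_instance
def pvRaiseWitness_recursive_tile_index : String := "abcdef"
def pvRaiseWitnessOut_recursive_tile_index : Int := 0

def Spec_recursive_tile_index (s : String) (out : Int) : Prop := out = recursive_tile_index_alt s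
instance (s : String) (out : Int) : Decidable (Spec_recursive_tile_index s out) := by unfold Spec_recursive_tile_index; infer_instance

-- ===== CLAIM (what is proved, stated in full; the proofs are below) =====
def Claim_equal_recursive_tile_index : Prop := ∀ (s : String), Dom_recursive_tile_index s → Pre_recursive_tile_index s → Spec_recursive_tile_index s (recursive_tile_index s)
def Claim_raises_recursive_tile_index : Prop := (∀ (s : String), Dom_recursive_tile_index s → Raises_recursive_tile_index s → ¬ Pre_recursive_tile_index s) ∧ (Dom_recursive_tile_index (pvRaiseWitness_recursive_tile_index) ∧ Raises_recursive_tile_index (pvRaiseWitness_recursive_tile_index) ∧ recursive_tile_index_alt (pvRaiseWitness_recursive_tile_index) = pvRaiseWitnessOut_recursive_tile_index)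

-- ===== LEMMAS AND PROOFS =====
theorem ofChars_digit (c : Char) (h : c.isDigit) :
    PySem.Int.ofChars? [c] = some ((c.toNat : Int) - 48) := by
  have h1 : 48 ≤ c.toNat ∧ c.toNat ≤ 57 := by
    simp [Char.isDigit] at h; exact ⟨h.1, h.2⟩
  have hc : c = Char.ofNat c.toNat := by simp
  obtain ⟨ha, hb⟩ := h1
  interval_cases hn : c.toNat <;> rw [hc] <;> decide

theorem mapM_digits (l : List Char) (h : ∀ c ∈ l, c.isDigit) :
    l.mapM (fun c => PySem.Int.ofChars? [c]) = some (l.map (fun c => ((c.toNat : Int) - 48))) := by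
  induction l with
  | nil => rfl
  | cons a t ih =>
      simp [List.mapM_cons, ofChars_digit a (h a (by simp)),
        ih (fun c hc => h c (by simp [hc]))]

theorem row3_eq (i : Int) (h0 : 0 ≤ i) (h9 : i ≤ 9) :
    (PySem.List.pyGet? pvRow3 i).getD 0
      = (if i ≥ 2 then 8 + (i - 2) * 1 else i * 2) + (if i = 3 then 1 else 0) := by
  interval_cases i <;> decide

theorem col3_eq (i : Int) (h0 : 0 ≤ i) (h9 : i ≤ 9) :
    (PySem.List.pyGet? pvCol3 i).getD 0 = (if i ≥ 2 then 4 + (i - 2) * 1 else i) := by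
  interval_cases i <;> decide

theorem recursive_tile_index_spec : Claim_equal_recursive_tile_index := by
  intro s _ hpre
  have h1 : s.toList.length = 1 → ∀ c ∈ s.toList, c.isDigit :=
    fun h => List.all_eq_true.mp (hpre.1 h)
  have h2 : ∀ c ∈ s.toList.drop 1, c.isDigit := List.all_eq_true.mp hpre.2
  unfold Spec_recursive_tile_index recursive_tile_index recursive_tile_index_alt
  rcases hls : s.toList with _ | ⟨a, _ | ⟨b, _ | ⟨c, _ | ⟨d, _ | ⟨e, _ | ⟨f, rest⟩⟩⟩⟩⟩⟩ <;>
    rw [hls] at h1 h2 <;> simp only []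
  · rfl
  · have ha := h1 rfl a (by simp)
    simp [PySem.List.pyGet?, PySem.List.pyIdx?, ofChars_digit a ha]
  · have hb := h2 b (by simp)
    simp [PySem.List.pyGet?, PySem.List.pyIdx?, ofChars_digit b hb]
  · have hb := h2 b (by simp)
    have hc := h2 c (by simp)
    have hb' : 48 ≤ b.toNat ∧ b.toNat ≤ 57 := by
      simp [Char.isDigit] at hb; exact ⟨hb.1, hb.2⟩
    have hc' : 48 ≤ c.toNat ∧ c.toNat ≤ 57 := by
      simp [Char.isDigit] at hc; exact ⟨hc.1, hc.2⟩
    simp [ofChars_digit b hb, ofChars_digit c hc,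
      row3_eq ((b.toNat : Int) - 48) (by omega) (by omega),
      col3_eq ((c.toNat : Int) - 48) (by omega) (by omega)]
    ring
  · have hb := h2 b (by simp)
    have hc := h2 c (by simp)
    have hd := h2 d (by simp)
    simp [ofChars_digit b hb, ofChars_digit c hc, ofChars_digit d hd, List.foldl]
    split_ifs <;> omega
  · have hb := h2 b (by simp)
    have hc := h2 c (by simp)
    have hd := h2 d (by simp)
    have he := h2 e (by simp)
    simp [ofChars_digit b hb, ofChars_digit c hc, ofChars_digit d hd, ofChars_digit e he,
      List.foldl]
    split_ifs <;> omega
  · have hall : ∀ x ∈ (b :: c :: d :: e :: f :: rest), x.isDigit := by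
      intro x hx; exact h2 x (by simpa using hx)
    rw [List.drop_one, List.tail_cons, mapM_digits _ hall]
    simp

theorem recursive_tile_index_raises : Claim_raises_recursive_tile_index := by
  unfold Claim_raises_recursive_tile_index
  refine ⟨?_, by decide⟩
  rintro s - ⟨-, hany⟩ hpre
  obtain ⟨c, hc, hnd⟩ := List.any_eq_true.mp hany
  simp only [Bool.not_eq_true'] at hnd
  exact absurd (List.all_eq_true.mp hpre.2 c hc) (by simp [hnd])

-- self-check reading the crash-fix witness value off the raises claim
theorem pvRaiseWitness_ok :
    recursive_tile_index_alt pvRaiseWitness_recursive_tile_index = pvRaiseWitnessOut_recursive_tile_index := by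
  have h := recursive_tile_index_raises
  unfold Claim_raises_recursive_tile_index at h
  exact h.2.2.2
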